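-- pv_equiv track=rewrite | github.com/carrillo21108/Lab-F-DDL | LRLib.py | goto
-- ===== SOURCE A (Python) =====
-- def closure(I,grammar):
--     J = I
--
--     while True:
--         new_items = set()
--         for head, body, indice_punto in J:
--             if indice_punto < len(body):  # Verificacion de posicion del punto antes del final
--                 simbolo = body[indice_punto]
--                 # Si el simbolo es un no terminal, se agregan las producciones
--                 if simbolo in set(grammar.keys()):
--                     for production in grammar[simbolo]:
--                         item = (simbolo, tuple(production.split(' ')), 0)  # Punto al inicio
--                         if item not in J:
--                             new_items.add(item)
--         if not new_items:
--             break  # Finalizacion cuando no hay nuevos items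
--         J.update(new_items)
--
--     return J
--
-- def goto(I,X,grammar):
--     res = set()
--     for head, body, indice_punto in I:
--         if indice_punto < len(body):  # Verificacion de posicion del punto antes del final
--             simbolo = body[indice_punto]
--             if simbolo == X:
--                 res = res.union(closure({(head,body,indice_punto+1)},grammar))
--
--     return res
-- ===== SOURCE B (Python) =====
-- def goto(I, X, grammar):
--     res = set()
--     nonterminals = grammar.keys()
--     for head, body, dot in I:
--         if dot < len(body) and body[dot] == X:
--             start = (head, body, dot + 1)
--             seen = {start}
--             order = [start]
--             i = 0
--             while i < len(order):  # worklist: each item is expanded exactly once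
--                 h, b, d = order[i]
--                 i += 1
--                 if d < len(b):
--                     sym = b[d]
--                     if sym in nonterminals:
--                         for production in grammar[sym]:
--                             item = (sym, tuple(production.split(' ')), 0)
--                             if item not in seen:
--                                 seen.add(item)
--                                 order.append(item)
--             res |= seen
--     return res
-- ===== Notes on version B (the rewrite author's own statement) =====
-- stated objective: alternative
-- what changed: A computes each closure by a fixpoint loop that rescans the entire growing item set (and rebuilds set(grammar.keys())) on every iteration until a round adds nothing; B computes the same closure with a single worklist pass that expands each discovered item exactly once.
import Mathlib
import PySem

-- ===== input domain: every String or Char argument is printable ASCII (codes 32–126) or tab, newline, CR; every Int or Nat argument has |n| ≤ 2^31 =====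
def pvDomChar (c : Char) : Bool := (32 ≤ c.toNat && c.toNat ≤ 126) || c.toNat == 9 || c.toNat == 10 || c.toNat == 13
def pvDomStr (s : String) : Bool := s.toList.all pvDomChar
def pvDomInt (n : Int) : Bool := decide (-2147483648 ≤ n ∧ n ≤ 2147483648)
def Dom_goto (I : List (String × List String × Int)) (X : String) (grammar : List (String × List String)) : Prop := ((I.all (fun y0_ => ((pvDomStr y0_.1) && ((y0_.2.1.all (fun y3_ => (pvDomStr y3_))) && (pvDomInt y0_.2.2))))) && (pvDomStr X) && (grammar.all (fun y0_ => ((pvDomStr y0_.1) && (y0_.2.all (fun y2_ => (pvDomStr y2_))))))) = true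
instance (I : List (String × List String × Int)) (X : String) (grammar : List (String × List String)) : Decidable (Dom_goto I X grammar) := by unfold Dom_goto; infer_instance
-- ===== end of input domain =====

-- B replaces A's repeated whole-set fixpoint re-scans by a worklist closure that
-- expands each discovered item exactly once (objective: alternative).

-- ── shared reference notions; their lemmas are cited by name in the ports' decreasing_by ──

abbrev PvItem : Type := String × List String × Int
abbrev PvGram : Type := PySem.Dict String (List String)

-- production.split(' ') with a nonempty separator: PySem.Str.split? is `some` here, exact.
def pvProdItems (sym : String) (prods : List String) : List PvItem :=
  prods.map (fun production => (sym, (PySem.Str.split? production " ").getD [], (0 : Int)))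

def pvChildren (g : PvGram) (it : PvItem) : List PvItem :=
  if it.2.2 < (it.2.1.length : Int) then
    match PySem.List.pyGet? it.2.1 it.2.2 with
    | none => []
    | some sym => if g.contains sym then pvProdItems sym (g.getD sym []) else []
  else []

def pvAddNew (K : List PvItem) : List PvItem → List PvItem
  | [] => []
  | c :: cs => if c ∈ K then pvAddNew K cs else c :: pvAddNew (K ++ [c]) cs

def pvScanNew (g : PvGram) : List PvItem → List PvItem → List PvItem
  | [], _ => []
  | it :: rest, K =>
      let ns := pvAddNew K (pvChildren g it)
      ns ++ pvScanNew g rest (K ++ ns)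

def pvAllProd (g : PvGram) : List PvItem :=
  g.items.flatMap (fun p => pvProdItems p.1 p.2)

def pvMu (g : PvGram) (J : List PvItem) : Nat :=
  ((pvAllProd g).filter (fun c => decide (c ∉ J))).length

theorem pvAddNew_mem : ∀ (cs K : List PvItem) {c}, c ∈ pvAddNew K cs → c ∈ cs ∧ c ∉ K := by
  intro cs
  induction cs with
  | nil => intro K c h; simp [pvAddNew] at h
  | cons c0 cs ih =>
    intro K c h
    simp only [pvAddNew] at h
    by_cases h0 : c0 ∈ K
    · rw [if_pos h0] at h
      obtain ⟨h1, h2⟩ := ih K h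
      exact ⟨List.mem_cons_of_mem _ h1, h2⟩
    · rw [if_neg h0] at h
      rcases List.mem_cons.mp h with rfl | h
      · exact ⟨List.mem_cons_self, h0⟩
      · obtain ⟨h1, h2⟩ := ih (K ++ [c0]) h
        exact ⟨List.mem_cons_of_mem _ h1, fun hK => h2 (List.mem_append_left _ hK)⟩

theorem pvProdItems_sub_allProd {g : PvGram} {sym : String} {c : PvItem}
    (h : g.contains sym = true) (hc : c ∈ pvProdItems sym (g.getD sym [])) : c ∈ pvAllProd g := by
  obtain ⟨v, hv⟩ : ∃ v, g.get? sym = some v := by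
    have h2 := PySem.Dict.contains_eq_isSome_get? g sym
    rw [h] at h2
    exact Option.isSome_iff_exists.mp h2.symm
  have hgd : g.getD sym [] = v := by
    rw [PySem.Dict.getD_eq_get?_getD, hv]; rfl
  refine List.mem_flatMap.mpr ⟨(sym, v), PySem.Dict.mem_items_of_get?_eq_some g hv, ?_⟩
  rw [hgd] at hc
  exact hc

theorem pvChildren_sub {g : PvGram} {it : PvItem} {c : PvItem}
    (hc : c ∈ pvChildren g it) : c ∈ pvAllProd g := by
  unfold pvChildren at hc
  split at hc
  · rcases hg : PySem.List.pyGet? it.2.1 it.2.2 with _ | sym <;> rw [hg] at hc <;> dsimp only at hc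
    · simp at hc
    · by_cases hcon : g.contains sym
      · rw [if_pos hcon] at hc
        exact pvProdItems_sub_allProd hcon hc
      · rw [if_neg hcon] at hc
        simp at hc
  · simp at hc

theorem pvScanNew_mem {g : PvGram} : ∀ (todo K : List PvItem) {c},
    c ∈ pvScanNew g todo K → c ∈ pvAllProd g ∧ c ∉ K := by
  intro todo
  induction todo with
  | nil => intro K c h; simp [pvScanNew] at h
  | cons it rest ih =>
    intro K c h
    simp only [pvScanNew] at h
    rcases List.mem_append.mp h with h | h
    · obtain ⟨h1, h2⟩ := pvAddNew_mem _ _ h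
      exact ⟨pvChildren_sub h1, h2⟩
    · obtain ⟨h1, h2⟩ := ih _ h
      exact ⟨h1, fun hK => h2 (List.mem_append_left _ hK)⟩

theorem pvMu_lt {g : PvGram} {J ns : List PvItem} (hne : ns ≠ [])
    (hsub : ∀ c ∈ ns, c ∈ pvAllProd g ∧ c ∉ J) : pvMu g (J ++ ns) < pvMu g J := by
  unfold pvMu
  have hfe : (pvAllProd g).filter (fun c => decide (c ∉ J ++ ns))
      = ((pvAllProd g).filter (fun c => decide (c ∉ J))).filter (fun c => decide (c ∉ ns)) := by
    rw [List.filter_filter]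
    apply List.filter_congr
    intro c _
    by_cases h1 : c ∈ J <;> by_cases h2 : c ∈ ns <;> simp [h1, h2]
  rw [hfe]
  obtain ⟨c0, hc0⟩ := List.exists_mem_of_ne_nil ns hne
  obtain ⟨ha, hj⟩ := hsub c0 hc0
  apply List.length_filter_lt_length_iff_exists.mpr
  exact ⟨c0, by simp [ha, hj], by simp [hc0]⟩

theorem pvSetAdd_eq (s : List PvItem) (x : PvItem) :
    PySem.Set.add s x = if x ∈ s then s else s ++ [x] := by
  simp [PySem.Set.add]

theorem foldl_add_eq (e : String → PvItem) : ∀ (prods : List String) (J new : List PvItem),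
    prods.foldl (fun acc production =>
      if e production ∈ J then acc else PySem.Set.add acc (e production)) new
    = new ++ pvAddNew (J ++ new) (prods.map e) := by
  intro prods
  induction prods with
  | nil => intro J new; simp [pvAddNew]
  | cons p ps ih =>
    intro J new
    simp only [List.foldl_cons, List.map_cons]
    by_cases hJ : e p ∈ J
    · rw [if_pos hJ, ih J new]
      have : pvAddNew (J ++ new) (e p :: ps.map e) = pvAddNew (J ++ new) (ps.map e) := by
        simp [pvAddNew, List.mem_append, hJ]
      rw [this]
    · rw [if_neg hJ, pvSetAdd_eq]
      by_cases hn : e p ∈ new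
      · rw [if_pos hn, ih J new]
        have : pvAddNew (J ++ new) (e p :: ps.map e) = pvAddNew (J ++ new) (ps.map e) := by
          simp [pvAddNew, List.mem_append, hn]
        rw [this]
      · rw [if_neg hn, ih J (new ++ [e p])]
        have hmem : e p ∉ J ++ new := by simp [List.mem_append, hJ, hn]
        have : pvAddNew (J ++ new) (e p :: ps.map e)
            = e p :: pvAddNew ((J ++ new) ++ [e p]) (ps.map e) := by
          simp [pvAddNew, hmem]
        rw [this]
        simp [List.append_assoc]

-- ===== PORT A =====
-- Python closure's inner scan: one pass over frozen J collecting new_items (a set).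
def closureRound (J : List PvItem) (g : PvGram) : List PvItem :=
  J.foldl (fun new_items it =>
    match it with
    | (_, body, indice_punto) =>
      if indice_punto < (body.length : Int) then
        match PySem.List.pyGet? body indice_punto with
        | none => new_items   -- IndexError in Python; outside Pre_goto
        | some simbolo =>
          if g.contains simbolo then
            (g.getD simbolo []).foldl (fun new_items production =>
              let item : PvItem := (simbolo, (PySem.Str.split? production " ").getD [], 0)
              if item ∈ J then new_items else PySem.Set.add new_items item) new_items
          else new_items
      else new_items) []

theorem stepA_eq (g : PvGram) (J : List PvItem) : ∀ (new : List PvItem) (it : PvItem),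
    (match it with
    | (_, body, indice_punto) =>
      if indice_punto < (body.length : Int) then
        match PySem.List.pyGet? body indice_punto with
        | none => new
        | some simbolo =>
          if g.contains simbolo then
            (g.getD simbolo []).foldl (fun new_items production =>
              let item : PvItem := (simbolo, (PySem.Str.split? production " ").getD [], 0)
              if item ∈ J then new_items else PySem.Set.add new_items item) new
          else new
      else new)
    = new ++ pvAddNew (J ++ new) (pvChildren g it) := by
  intro new it
  rcases it with ⟨head, body, d⟩
  simp only [pvChildren]
  by_cases hlt : d < (body.length : Int)
  · rw [if_pos hlt, if_pos hlt]
    rcases hg : PySem.List.pyGet? body d with _ | s <;> dsimp only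
    · simp [pvAddNew]
    · by_cases hcon : g.contains s
      · rw [if_pos hcon, if_pos hcon]
        exact foldl_add_eq (fun production => (s, (PySem.Str.split? production " ").getD [], 0)) _ J new
      · rw [if_neg hcon, if_neg hcon]
        simp [pvAddNew]
  · rw [if_neg hlt, if_neg hlt]
    simp [pvAddNew]

theorem foldRound_eq (g : PvGram) (J : List PvItem) : ∀ (todo acc : List PvItem),
    todo.foldl (fun new it => new ++ pvAddNew (J ++ new) (pvChildren g it)) acc
    = acc ++ pvScanNew g todo (J ++ acc) := by
  intro todo
  induction todo with
  | nil => intro acc; simp [pvScanNew]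
  | cons it rest ih =>
    intro acc
    simp only [List.foldl_cons, pvScanNew]
    rw [ih (acc ++ pvAddNew (J ++ acc) (pvChildren g it))]
    simp [List.append_assoc]

theorem closureRound_eq (J : List PvItem) (g : PvGram) : closureRound J g = pvScanNew g J J := by
  unfold closureRound
  have hf : (fun (new_items : List PvItem) (it : PvItem) =>
      match it with
      | (_, body, indice_punto) =>
        if indice_punto < (body.length : Int) then
          match PySem.List.pyGet? body indice_punto with
          | none => new_items
          | some simbolo =>
            if g.contains simbolo then
              (g.getD simbolo []).foldl (fun new_items production =>
                let item : PvItem := (simbolo, (PySem.Str.split? production " ").getD [], 0)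
                if item ∈ J then new_items else PySem.Set.add new_items item) new_items
            else new_items
        else new_items)
      = (fun new it => new ++ pvAddNew (J ++ new) (pvChildren g it)) := by
    funext new it
    exact stepA_eq g J new it
  rw [hf, foldRound_eq g J J []]
  simp

-- Python closure's 'while True' fixpoint loop.
def closureLoop (J : List PvItem) (g : PvGram) : List PvItem :=
  let new_items := closureRound J g
  if h : new_items = [] then J else closureLoop (J ++ new_items) g
termination_by pvMu g J
decreasing_by
  exact pvMu_lt h (fun c hc => pvScanNew_mem _ _ (closureRound_eq J g ▸ hc))

def goto (I : List (String × List String × Int)) (X : String) (grammar : List (String × List String)) : List (String × List String × Int) :=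
  let g : PvGram := PySem.Dict.ofList grammar
  I.foldl (fun res it =>
    match it with
    | (head, body, indice_punto) =>
      if indice_punto < (body.length : Int) then
        match PySem.List.pyGet? body indice_punto with
        | none => res   -- IndexError in Python; outside Pre_goto
        | some simbolo =>
          if simbolo = X then PySem.Set.union res (closureLoop [(head, body, indice_punto + 1)] g)
          else res
      else res) []

-- ===== PORT B =====
-- B's inner 'for production …' loop: grow seen and the pending part of order together.
def bqAdd (simbolo : String) (prods : List String) (seen pending : List PvItem) : List PvItem × List PvItem :=
  prods.foldl (fun acc production =>
    let item : PvItem := (simbolo, (PySem.Str.split? production " ").getD [], 0)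
    if item ∈ acc.1 then acc else (acc.1 ++ [item], acc.2 ++ [item])) (seen, pending)

theorem foldl_pair_eq (e : String → PvItem) : ∀ (prods : List String) (seen pending : List PvItem),
    prods.foldl (fun acc production =>
      if e production ∈ acc.1 then acc else (acc.1 ++ [e production], acc.2 ++ [e production])) (seen, pending)
    = (seen ++ pvAddNew seen (prods.map e), pending ++ pvAddNew seen (prods.map e)) := by
  intro prods
  induction prods with
  | nil => intro seen pending; simp [pvAddNew]
  | cons p ps ih =>
    intro seen pending
    simp only [List.foldl_cons, List.map_cons]
    by_cases h : e p ∈ seen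
    · rw [if_pos h, ih seen pending]
      have : pvAddNew seen (e p :: ps.map e) = pvAddNew seen (ps.map e) := by
        simp [pvAddNew, h]
      rw [this]
    · rw [if_neg h]
      rw [ih (seen ++ [e p]) (pending ++ [e p])]
      have : pvAddNew seen (e p :: ps.map e) = e p :: pvAddNew (seen ++ [e p]) (ps.map e) := by
        simp [pvAddNew, h]
      rw [this]
      simp [List.append_assoc]

theorem bqAdd_eq (simbolo : String) (prods : List String) (seen pending : List PvItem) :
    bqAdd simbolo prods seen pending =
      (seen ++ pvAddNew seen (pvProdItems simbolo prods),
       pending ++ pvAddNew seen (pvProdItems simbolo prods)) := by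
  unfold bqAdd
  exact foldl_pair_eq (fun production => (simbolo, (PySem.Str.split? production " ").getD [], 0)) prods seen pending

-- B's 'while i < len(order)' worklist; todo is order[i:], seen is all of order.
def gotoWork (g : PvGram) (todo seen : List PvItem) : List PvItem :=
  match todo with
  | [] => seen
  | it :: rest =>
    if it.2.2 < (it.2.1.length : Int) then
      match PySem.List.pyGet? it.2.1 it.2.2 with
      | none => gotoWork g rest seen   -- IndexError in Python; outside Pre_goto
      | some simbolo =>
        if g.contains simbolo then
          let sr := bqAdd simbolo (g.getD simbolo []) seen rest
          gotoWork g sr.2 sr.1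
        else gotoWork g rest seen
    else gotoWork g rest seen
termination_by (pvMu g seen, todo.length)
decreasing_by
  all_goals first
  | exact Prod.Lex.right _ (Nat.lt_succ_self _)
  | · rw [bqAdd_eq]
      rcases hns : pvAddNew seen (pvProdItems simbolo (PySem.Dict.getD g simbolo [])) with _ | ⟨c0, cs⟩
      · simp only [List.append_nil]
        exact Prod.Lex.right _ (Nat.lt_succ_self _)
      · refine Prod.Lex.left _ _ (pvMu_lt (by simp) ?_)
        intro c hc
        obtain ⟨hc1, hc2⟩ := pvAddNew_mem _ _ (hns ▸ hc)
        exact ⟨pvProdItems_sub_allProd (by assumption) hc1, hc2⟩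

def goto_alt (I : List (String × List String × Int)) (X : String) (grammar : List (String × List String)) : List (String × List String × Int) :=
  let g : PvGram := PySem.Dict.ofList grammar
  I.foldl (fun res it =>
    match it with
    | (head, body, dot) =>
      if dot < (body.length : Int) then
        match PySem.List.pyGet? body dot with
        | none => res   -- IndexError in Python; outside Pre_goto
        | some sym =>
          if sym = X then
            let start : PvItem := (head, body, dot + 1)
            PySem.Set.union res (gotoWork g [start] [start])
          else res
      else res) []

-- ===== PRECONDITION & SPEC =====
-- Pre_goto: exactly the inputs on which Python's body[indice_punto] never raises IndexError,
-- i.e. every item's dot index is ≥ -len(body) (indices ≥ len(body) are guarded by A itself).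
def Pre_goto (I : List (String × List String × Int)) (X : String) (grammar : List (String × List String)) : Prop :=
  ∀ it ∈ I, -(it.2.1.length : Int) ≤ it.2.2
instance (I : List (String × List String × Int)) (X : String) (grammar : List (String × List String)) : Decidable (Pre_goto I X grammar) := by unfold Pre_goto; infer_instance

def pvWitness_goto : (List (String × List String × Int)) × String × (List (String × List String)) :=
  ([("S'", ["S", "S"], 0)], "S", [("S", ["a S", "b"])])

def Spec_goto (I : List (String × List String × Int)) (X : String) (grammar : List (String × List String)) (out : List (String × List String × Int)) : Prop := out = goto_alt I X grammar
instance (I : List (String × List String × Int)) (X : String) (grammar : List (String × List String)) (out : List (String × List String × Int)) : Decidable (Spec_goto I X grammar out) := by unfold Spec_goto; infer_instance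

-- ===== CLAIM (what is proved, stated in full; the proofs are below) =====
def Claim_equal_goto : Prop := ∀ (I : List (String × List String × Int)) (X : String) (grammar : List (String × List String)), Dom_goto I X grammar → Pre_goto I X grammar → Spec_goto I X grammar (goto I X grammar)

-- ===== LEMMAS AND PROOFS =====

theorem gotoWork_cons (g : PvGram) (it : PvItem) (rest seen : List PvItem) :
    gotoWork g (it :: rest) seen =
      gotoWork g (rest ++ pvAddNew seen (pvChildren g it)) (seen ++ pvAddNew seen (pvChildren g it)) := by
  rw [gotoWork]
  rcases it with ⟨head, body, d⟩
  simp only [pvChildren]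
  by_cases hlt : d < (body.length : Int)
  · rw [if_pos hlt, if_pos hlt]
    rcases hg : PySem.List.pyGet? body d with _ | s <;> dsimp only
    · simp [pvAddNew]
    · by_cases hcon : g.contains s
      · rw [if_pos hcon, if_pos hcon, bqAdd_eq]
      · rw [if_neg hcon, if_neg hcon]
        simp [pvAddNew]
  · rw [if_neg hlt, if_neg hlt]
    simp [pvAddNew]

theorem chainB (g : PvGram) : ∀ (todo extra seen : List PvItem),
    gotoWork g (todo ++ extra) seen =
      gotoWork g (extra ++ pvScanNew g todo seen) (seen ++ pvScanNew g todo seen) := by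
  intro todo
  induction todo with
  | nil => intro extra seen; simp [pvScanNew]
  | cons it rest ih =>
    intro extra seen
    rw [List.cons_append, gotoWork_cons]
    rw [show rest ++ extra ++ pvAddNew seen (pvChildren g it)
        = rest ++ (extra ++ pvAddNew seen (pvChildren g it)) from by simp [List.append_assoc]]
    rw [ih (extra ++ pvAddNew seen (pvChildren g it)) (seen ++ pvAddNew seen (pvChildren g it))]
    simp only [pvScanNew]
    simp [List.append_assoc]

theorem pvAddNew_nil_of_sub : ∀ (cs K : List PvItem), (∀ c ∈ cs, c ∈ K) → pvAddNew K cs = [] := by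
  intro cs
  induction cs with
  | nil => intro K _; rfl
  | cons c0 cs ih =>
    intro K h
    simp only [pvAddNew, if_pos (h c0 List.mem_cons_self)]
    exact ih K (fun c hc => h c (List.mem_cons_of_mem _ hc))

theorem pvScanNew_closed_prefix (g : PvGram) :
    ∀ (pre todo K : List PvItem), (∀ it ∈ pre, ∀ c ∈ pvChildren g it, c ∈ K) →
      pvScanNew g (pre ++ todo) K = pvScanNew g todo K := by
  intro pre
  induction pre with
  | nil => intro todo K _; rfl
  | cons it pre ih =>
    intro todo K h
    rw [List.cons_append]
    simp only [pvScanNew]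
    rw [pvAddNew_nil_of_sub _ _ (h it List.mem_cons_self)]
    simp only [List.append_nil, List.nil_append]
    exact ih todo K (fun it' hit' => h it' (List.mem_cons_of_mem _ hit'))

theorem pvAddNew_cover : ∀ (cs K : List PvItem) {c}, c ∈ cs → c ∈ K ++ pvAddNew K cs := by
  intro cs
  induction cs with
  | nil => intro K c h; simp at h
  | cons c0 cs ih =>
    intro K c h
    simp only [pvAddNew]
    by_cases h0 : c0 ∈ K
    · rw [if_pos h0]
      rcases List.mem_cons.mp h with rfl | h
      · exact List.mem_append_left _ h0
      · exact ih K h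
    · rw [if_neg h0]
      rcases List.mem_cons.mp h with rfl | h
      · simp
      · have := ih (K ++ [c0]) h
        simp only [List.mem_append, List.mem_cons] at this ⊢
        tauto

theorem pvChildren_cover (g : PvGram) :
    ∀ (todo K : List PvItem), ∀ it ∈ todo, ∀ c ∈ pvChildren g it, c ∈ K ++ pvScanNew g todo K := by
  intro todo
  induction todo with
  | nil => intro K it h; simp at h
  | cons it0 rest ih =>
    intro K it hit c hc
    simp only [pvScanNew]
    rcases List.mem_cons.mp hit with rfl | hit
    · have := pvAddNew_cover (pvChildren g it) K hc
      simp only [List.mem_append] at this ⊢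
      tauto
    · have := ih (K ++ pvAddNew K (pvChildren g it0)) it hit c hc
      simp only [List.mem_append] at this ⊢
      tauto

theorem gotoWork_nil (g : PvGram) (seen : List PvItem) : gotoWork g [] seen = seen := by
  rw [gotoWork]

theorem loop_eq_work (g : PvGram) :
    ∀ (n : Nat) (pre todo : List PvItem), pvMu g (pre ++ todo) ≤ n →
      (∀ it ∈ pre, ∀ c ∈ pvChildren g it, c ∈ pre ++ todo) →
      closureLoop (pre ++ todo) g = gotoWork g todo (pre ++ todo) := by
  intro n
  induction n using Nat.strong_induction_on with
  | _ n ih =>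
    intro pre todo hn hclosed
    have hround : closureRound (pre ++ todo) g = pvScanNew g todo (pre ++ todo) := by
      rw [closureRound_eq, pvScanNew_closed_prefix g pre todo _ hclosed]
    rw [closureLoop]
    simp only [hround]
    by_cases hSe : pvScanNew g todo (pre ++ todo) = []
    · rw [dif_pos hSe]
      have h1 := chainB g todo [] (pre ++ todo)
      rw [hSe] at h1
      simp only [List.append_nil, gotoWork_nil] at h1
      exact h1.symm
    · rw [dif_neg hSe]
      have hmem : ∀ c ∈ pvScanNew g todo (pre ++ todo), c ∈ pvAllProd g ∧ c ∉ pre ++ todo :=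
        fun c hc => pvScanNew_mem _ _ hc
      have hlt : pvMu g ((pre ++ todo) ++ pvScanNew g todo (pre ++ todo)) < pvMu g (pre ++ todo) :=
        pvMu_lt hSe hmem
      have hrec := ih (pvMu g ((pre ++ todo) ++ pvScanNew g todo (pre ++ todo)))
        (Nat.lt_of_lt_of_le hlt hn) (pre ++ todo) (pvScanNew g todo (pre ++ todo))
        (Nat.le_refl _) ?_
      · rw [hrec]
        have h2 := chainB g todo [] (pre ++ todo)
        simp only [List.append_nil, List.nil_append] at h2
        exact h2.symm
      · intro it hit c hc
        rcases List.mem_append.mp hit with hpre | htodo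
        · exact List.mem_append_left _ (hclosed it hpre c hc)
        · exact pvChildren_cover g todo (pre ++ todo) it htodo c hc

theorem closure_eq (g : PvGram) (k : PvItem) : closureLoop [k] g = gotoWork g [k] [k] := by
  have h := loop_eq_work g (pvMu g [k]) [] [k] (by simp) (by simp)
  simpa using h

-- ===== VERDICT (by name: the statement is the Claim_ definition above) =====
theorem goto_spec : Claim_equal_goto := by
  intro I X grammar _ _
  unfold Spec_goto goto goto_alt
  dsimp only
  congr 1
  funext res it
  rcases it with ⟨head, body, dot⟩
  dsimp only
  by_cases hlt : dot < (body.length : Int)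
  · rw [if_pos hlt, if_pos hlt]
    rcases hg : PySem.List.pyGet? body dot with _ | s <;> dsimp only
    by_cases hX : s = X
    · rw [if_pos hX, if_pos hX, closure_eq]
    · rw [if_neg hX, if_neg hX]
  · rw [if_neg hlt, if_neg hlt]
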